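-- pv_equiv track=rewrite | github.com/gheorghitamutu/Numerical-Calculus-Homework | homework03.py | check_mul
-- ===== SOURCE A (Python) =====
-- def check_mul(A1, A2):
--     if A1.keys() != A2.keys():
--         return False
--     A1_values = [sorted([elem[0] for elem in A1[key]]) for key in A1]
--     A2_values = [sorted([elem[0] for elem in A2[key]]) for key in A2]
--     for index, (A1_line, A2_line) in enumerate(zip(A1_values, A2_values)):
--         if A1_line not in A2_values or A2_line not in A1_values:
--             return False
--     return True
-- ===== SOURCE B (Python) =====
-- def check_mul(A1, A2):
--     if A1.keys() != A2.keys():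
--         return False
--     def rows(A):
--         return {tuple(sorted(e[0] for e in row)) for row in A.values()}
--     return rows(A1) == rows(A2)
-- ===== Notes on version B (the rewrite author's own statement) =====
-- stated objective: simpler
-- what changed: replaces the per-row list-membership loop (each 'line in other_values' scans the other matrix's whole row list) by building one set of sorted-row tuples per matrix and comparing the two sets for equality
import Mathlib
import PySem

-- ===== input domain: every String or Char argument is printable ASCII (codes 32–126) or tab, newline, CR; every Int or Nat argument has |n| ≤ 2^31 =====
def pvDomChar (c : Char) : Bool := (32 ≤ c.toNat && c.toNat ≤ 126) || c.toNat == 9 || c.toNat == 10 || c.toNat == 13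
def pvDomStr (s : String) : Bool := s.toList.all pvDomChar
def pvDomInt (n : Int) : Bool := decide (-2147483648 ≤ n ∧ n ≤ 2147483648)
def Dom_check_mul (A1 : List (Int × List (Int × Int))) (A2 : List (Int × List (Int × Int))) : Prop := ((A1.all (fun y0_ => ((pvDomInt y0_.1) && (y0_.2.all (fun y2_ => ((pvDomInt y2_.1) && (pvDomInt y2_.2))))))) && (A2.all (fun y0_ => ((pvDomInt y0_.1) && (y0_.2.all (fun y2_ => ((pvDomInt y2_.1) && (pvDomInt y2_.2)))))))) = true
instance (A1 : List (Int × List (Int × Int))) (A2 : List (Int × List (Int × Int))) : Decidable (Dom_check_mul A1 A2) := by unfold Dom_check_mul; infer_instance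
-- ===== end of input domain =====

-- B replaces A's per-row membership scans over the other matrix's row list by one set of
-- sorted rows per matrix compared for set equality (simpler; return value identical).


-- ===== PORT A =====
-- for index, (A1_line, A2_line) in enumerate(zip(...)): if l1 not in v2 or l2 not in v1: return False
def checkLoopA (zs : List (List Int × List Int)) (v1 v2 : List (List Int)) : Bool :=
  match zs with
  | [] => true
  | (l1, l2) :: rest =>
      if !v2.contains l1 || !v1.contains l2 then false else checkLoopA rest v1 v2

def check_mul (A1 : List (Int × List (Int × Int))) (A2 : List (Int × List (Int × Int))) : Bool :=
  -- A1.keys() != A2.keys(): dict key views compare as sets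
  if !(PySem.Set.equal (PySem.Set.ofList (A1.map Prod.fst)) (PySem.Set.ofList (A2.map Prod.fst))) then
    false
  else
    -- [sorted([elem[0] for elem in A1[key]]) for key in A1]  (A1[key] = dict lookup)
    let v1 := A1.map (fun kv => PySem.List.sorted (((PySem.Dict.mk A1).getD kv.1 []).map Prod.fst) (fun x => x) false)
    let v2 := A2.map (fun kv => PySem.List.sorted (((PySem.Dict.mk A2).getD kv.1 []).map Prod.fst) (fun x => x) false)
    checkLoopA (v1.zip v2) v1 v2

-- ===== PORT B =====
-- {tuple(sorted(e[0] for e in row)) for row in A.values()}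
def rowSet (A : List (Int × List (Int × Int))) : PySem.Set (List Int) :=
  PySem.Set.ofList (A.map (fun kv => PySem.List.sorted (kv.2.map Prod.fst) (fun x => x) false))

def check_mul_alt (A1 : List (Int × List (Int × Int))) (A2 : List (Int × List (Int × Int))) : Bool :=
  if !(PySem.Set.equal (PySem.Set.ofList (A1.map Prod.fst)) (PySem.Set.ofList (A2.map Prod.fst))) then
    false
  else
    PySem.Set.equal (rowSet A1) (rowSet A2)

-- ===== PRECONDITION & SPEC =====
-- Pre_ excludes association lists with duplicate keys: those cannot arise from a Python dict
-- argument, so A never receives (and never returns on) such inputs.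
def Pre_check_mul (A1 : List (Int × List (Int × Int))) (A2 : List (Int × List (Int × Int))) : Prop :=
  (A1.map Prod.fst).Nodup ∧ (A2.map Prod.fst).Nodup
instance (A1 : List (Int × List (Int × Int))) (A2 : List (Int × List (Int × Int))) : Decidable (Pre_check_mul A1 A2) := by unfold Pre_check_mul; infer_instance

def pvWitness_check_mul : (List (Int × List (Int × Int))) × (List (Int × List (Int × Int))) :=
  ([(1, [(2, 3)]), (2, [(5, 0)])], [(2, [(2, 1)]), (1, [(5, 7)])])

def Spec_check_mul (A1 : List (Int × List (Int × Int))) (A2 : List (Int × List (Int × Int))) (out : Bool) : Prop := out = check_mul_alt A1 A2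
instance (A1 : List (Int × List (Int × Int))) (A2 : List (Int × List (Int × Int))) (out : Bool) : Decidable (Spec_check_mul A1 A2 out) := by unfold Spec_check_mul; infer_instance

-- ===== CLAIM (what is proved, stated in full; the proofs are below) =====
def Claim_equal_check_mul : Prop := ∀ (A1 : List (Int × List (Int × Int))) (A2 : List (Int × List (Int × Int))), Dom_check_mul A1 A2 → Pre_check_mul A1 A2 → Spec_check_mul A1 A2 (check_mul A1 A2)

-- ===== LEMMAS AND PROOFS =====

-- A's early-return loop is an 'all' over the zipped rows
theorem checkLoopA_eq_all (zs : List (List Int × List Int)) (v1 v2 : List (List Int)) :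
    checkLoopA zs v1 v2 = zs.all (fun p => v2.contains p.1 && v1.contains p.2) := by
  induction zs with
  | nil => rfl
  | cons p rest ih =>
      obtain ⟨l1, l2⟩ := p
      simp only [checkLoopA, ih, List.all_cons]
      by_cases h1 : v2.contains l1 <;> by_cases h2 : v1.contains l2 <;> simp_all

-- under Nodup keys, A's dict lookup of each key returns that pair's value
theorem lookup_eq (A : List (Int × List (Int × Int))) (h : (A.map Prod.fst).Nodup)
    (kv : Int × List (Int × Int)) (hm : kv ∈ A) :
    (PySem.Dict.mk A).getD kv.1 [] = kv.2 := by
  exact PySem.Dict.getD_of_mem_items (PySem.Dict.mk A) (k := kv.1) (v := kv.2) hm h []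

theorem vals_eq (A : List (Int × List (Int × Int))) (h : (A.map Prod.fst).Nodup) :
    A.map (fun kv => PySem.List.sorted (((PySem.Dict.mk A).getD kv.1 []).map Prod.fst) (fun x => x) false)
      = A.map (fun kv => PySem.List.sorted (kv.2.map Prod.fst) (fun x => x) false) := by
  apply List.map_congr_left
  intro kv hm
  rw [lookup_eq A h kv hm]

-- the zipped mutual-membership check over equal-length lists is set equality
theorem all_zip_eq_setEqual (v1 v2 : List (List Int)) (hlen : v1.length = v2.length) :
    (v1.zip v2).all (fun p => v2.contains p.1 && v1.contains p.2)
      = PySem.Set.equal (PySem.Set.ofList v1) (PySem.Set.ofList v2) := by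
  rw [Bool.eq_iff_iff, List.all_eq_true, PySem.Set.equal_iff]
  simp only [Bool.and_eq_true, List.contains_eq_mem, decide_eq_true_eq, PySem.Set.mem_ofList]
  constructor
  · intro h x
    constructor
    · intro hx
      obtain ⟨i, hi, hxe⟩ := List.mem_iff_getElem.mp hx
      have hz : (v1[i], v2[i]'(by omega)) ∈ v1.zip v2 := by
        have hlt : i < (v1.zip v2).length := by simp [List.length_zip]; omega
        have := List.getElem_mem (l := v1.zip v2) (n := i) hlt
        rwa [List.getElem_zip] at this
      rw [← hxe]; exact (h _ hz).1
    · intro hx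
      obtain ⟨i, hi, hxe⟩ := List.mem_iff_getElem.mp hx
      have hz : (v1[i]'(by omega), v2[i]) ∈ v1.zip v2 := by
        have hlt : i < (v1.zip v2).length := by simp [List.length_zip]; omega
        have := List.getElem_mem (l := v1.zip v2) (n := i) hlt
        rwa [List.getElem_zip] at this
      rw [← hxe]; exact (h _ hz).2
  · intro h p hp
    exact ⟨(h p.1).mp (List.of_mem_zip hp).1, (h p.2).mpr (List.of_mem_zip hp).2⟩

-- ===== VERDICT (by name: the statement is the Claim_ definition above) =====
theorem check_mul_spec : Claim_equal_check_mul := by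
  intro A1 A2 _hdom hpre
  obtain ⟨h1, h2⟩ := hpre
  unfold Spec_check_mul check_mul check_mul_alt
  by_cases hk : PySem.Set.equal (PySem.Set.ofList (A1.map Prod.fst)) (PySem.Set.ofList (A2.map Prod.fst)) = true
  · rw [hk]
    simp only [Bool.not_true, Bool.false_eq_true, if_false]
    have hlen : A1.length = A2.length := by
      rw [PySem.Set.equal_iff] at hk
      have hperm : (A1.map Prod.fst).Perm (A2.map Prod.fst) := by
        rw [List.perm_ext_iff_of_nodup h1 h2]
        intro a
        have := hk a
        rw [PySem.Set.mem_ofList, PySem.Set.mem_ofList] at this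
        exact this
      have := hperm.length_eq
      simpa using this
    rw [vals_eq A1 h1, vals_eq A2 h2, checkLoopA_eq_all, all_zip_eq_setEqual]
    · rfl
    · simp [hlen]
  · rw [Bool.eq_false_iff.mpr hk]
    rfl
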